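-- pv_equiv track=rewrite | github.com/pypi-data/pypi-mirror-389 | packages/nanako/nanako-0.3.0-py3-none-any.whl/nanako/nanako.py | error_details
-- ===== SOURCE A (Python) =====
-- def error_details(text, pos):
--     line = 1
--     col = 1
--     start = 0
--     for i, char in enumerate(text):
--         if i == pos:
--             break
--         if char == '\n':
--             line += 1
--             col = 1
--             start = i + 1
--         else:
--             col += 1
--     end = text.find('\n', start)
--     if end == -1:
--         end = len(text)
--     return text, line, col, text[start:end]
-- ===== SOURCE B (Python) =====
-- def error_details(text, pos):
--     n = len(text)
--     p = pos if 0 <= pos <= n else n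
--     before = text[:p]
--     line = before.count('\n') + 1
--     start = before.rfind('\n') + 1
--     col = p - start + 1
--     end = text.find('\n', start)
--     if end == -1:
--         end = n
--     return text, line, col, text[start:end]
-- ===== Notes on version B (the rewrite author's own statement) =====
-- stated objective: idiomatic
-- what changed: Replaces A's explicit enumerate loop (per-character line/col/start bookkeeping with a break at pos) by direct string primitives on the clamped prefix text[:p]: count('\n') for the line, rfind('\n') for the line start, and arithmetic for the column.
import Mathlib
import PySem

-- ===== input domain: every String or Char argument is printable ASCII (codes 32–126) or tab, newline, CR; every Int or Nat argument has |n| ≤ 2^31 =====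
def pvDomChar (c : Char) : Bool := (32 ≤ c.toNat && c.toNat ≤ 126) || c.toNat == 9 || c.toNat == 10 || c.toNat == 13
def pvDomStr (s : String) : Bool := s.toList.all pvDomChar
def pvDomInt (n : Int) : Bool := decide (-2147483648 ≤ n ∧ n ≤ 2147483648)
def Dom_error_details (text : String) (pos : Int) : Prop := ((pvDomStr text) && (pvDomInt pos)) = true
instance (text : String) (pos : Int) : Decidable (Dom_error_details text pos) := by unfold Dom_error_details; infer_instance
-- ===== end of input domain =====

-- B replaces A's explicit character-by-character scan by idiomatic string primitives
-- (count / rfind on the clamped prefix); return value only, no side effects in either.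

-- ===== PORT A =====
-- the 'for i, char in enumerate(text)' loop with its break at i == pos
def edLoop (pos : Int) (cs : List Char) (i line col start : Int) : Int × Int × Int :=
  match cs with
  | [] => (line, col, start)
  | ch :: rest =>
    if i = pos then (line, col, start)
    else if ch = '\n' then edLoop pos rest (i+1) (line+1) 1 (i+1)
    else edLoop pos rest (i+1) line (col+1) start

def error_details (text : String) (pos : Int) : String × Int × Int × String :=
  let st := edLoop pos text.toList 0 1 1 0
  let line := st.1
  let col := st.2.1
  let start := st.2.2
  let e0 := PySem.Str.findFrom text "\n" start
  let e : Int := if e0 = -1 then PySem.Str.len text else e0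
  (text, line, col, PySem.Str.slice text (some start) (some e))

-- ===== PORT B =====
def error_details_alt (text : String) (pos : Int) : String × Int × Int × String :=
  let n : Int := PySem.Str.len text
  let p : Int := if 0 ≤ pos ∧ pos ≤ n then pos else n
  let before : List Char := PySem.List.slice text.toList none (some p)   -- text[:p] (code points)
  let line : Int := (PySem.Chars.count before ['\n'] : Int) + 1          -- before.count('\n') + 1
  let start : Int := PySem.Chars.rfind before ['\n'] + 1                 -- before.rfind('\n') + 1
  let col : Int := p - start + 1
  let e0 := PySem.Str.findFrom text "\n" start
  let e : Int := if e0 = -1 then n else e0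
  (text, line, col, PySem.Str.slice text (some start) (some e))

-- ===== PRECONDITION & SPEC =====
def Spec_error_details (text : String) (pos : Int) (out : String × Int × Int × String) : Prop := out = error_details_alt text pos
instance (text : String) (pos : Int) (out : String × Int × Int × String) : Decidable (Spec_error_details text pos out) := by unfold Spec_error_details; infer_instance

-- ===== CLAIM (what is proved, stated in full; the proofs are below) =====
def Claim_equal_error_details : Prop := ∀ (text : String) (pos : Int), Dom_error_details text pos → Spec_error_details text pos (error_details text pos)


-- ===== LEMMAS AND PROOFS =====

-- count with a one-character needle is List.count
lemma count_go_singleton (c : Char) : ∀ (s : List Char) (fuel acc : Nat), s.length ≤ fuel →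
    PySem.Chars.count.go [c] fuel s acc = acc + s.count c := by
  intro s
  induction s with
  | nil => intro fuel acc _; cases fuel <;> simp [PySem.Chars.count.go]
  | cons h t ih =>
    intro fuel acc hf
    cases fuel with
    | zero => simp at hf
    | succ f =>
      by_cases hc : c = h
      · subst hc
        have hpre : ([c].isPrefixOf (c :: t)) = true := by simp [List.isPrefixOf]
        simp only [PySem.Chars.count.go, hpre, if_true, List.length_nil, List.length_cons,
          List.drop_succ_cons, List.drop_zero]
        rw [ih f (acc + 1) (by simp only [List.length_cons] at hf; omega)]
        simp [List.count_cons]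
        omega
      · have hpre : ([c].isPrefixOf (h :: t)) = false := by
          simp [List.isPrefixOf]
          exact fun hh => (hc hh).elim
        simp only [PySem.Chars.count.go, hpre, Bool.false_eq_true, if_false]
        rw [ih f acc (by simp only [List.length_cons] at hf; omega)]
        have hne : ¬ (h = c) := fun e => hc e.symm
        simp [List.count_cons, hne]

lemma count_singleton (s : List Char) (c : Char) :
    PySem.Chars.count s [c] = s.count c := by
  simpa [PySem.Chars.count] using count_go_singleton c s s.length 0 le_rfl

lemma count_cons_nl (s : List Char) :
    PySem.Chars.count ('\n' :: s) ['\n'] = PySem.Chars.count s ['\n'] + 1 := by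
  simp [count_singleton, List.count_cons]

lemma count_cons_other {ch : Char} (hch : ¬ ch = '\n') (s : List Char) :
    PySem.Chars.count (ch :: s) ['\n'] = PySem.Chars.count s ['\n'] := by
  have : ¬ (ch = '\n') := hch
  simp [count_singleton, List.count_cons, this]

-- rfind is ≥ -1
lemma rfind_go_ge (s sub : List Char) : ∀ k : Nat, -1 ≤ PySem.Chars.rfind.go s sub k := by
  intro k
  induction k with
  | zero =>
    simp only [PySem.Chars.rfind.go]
    split <;> omega
  | succ j ih =>
    simp only [PySem.Chars.rfind.go]
    split
    · omega
    · exact ih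

lemma rfind_ge (s sub : List Char) : -1 ≤ PySem.Chars.rfind s sub :=
  rfind_go_ge s sub s.length

-- rfind with a one-character needle, cons step
lemma rfind_go_cons (c ch : Char) (s : List Char) : ∀ k : Nat,
    PySem.Chars.rfind.go (c :: s) [ch] (k+1) =
      if PySem.Chars.rfind.go s [ch] k = -1 then (if ch = c then 0 else -1)
      else PySem.Chars.rfind.go s [ch] k + 1 := by
  intro k
  induction k with
  | zero =>
    simp only [PySem.Chars.rfind.go, List.drop_succ_cons, List.drop_zero]
    have hpc : ([ch].isPrefixOf (c :: s)) = (ch == c) := by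
      simp [List.isPrefixOf]
    by_cases hp : [ch].isPrefixOf s
    · simp [hp]
    · simp only [hp, Bool.false_eq_true, if_false, if_true, hpc]
      by_cases he : ch = c <;> simp [he]
  | succ j ih =>
    have hdrop : List.drop (j + 1 + 1) (c :: s) = List.drop (j + 1) s := by
      simp
    by_cases hp : [ch].isPrefixOf (List.drop (j+1) s)
    · have h1 : PySem.Chars.rfind.go (c :: s) [ch] (j + 1 + 1) = ((j:Int) + 1 + 1) := by
        simp only [PySem.Chars.rfind.go, hdrop, hp, if_true]
        push_cast; ring
      have h2 : PySem.Chars.rfind.go s [ch] (j + 1) = ((j:Int) + 1) := by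
        simp only [PySem.Chars.rfind.go, hp, if_true]
        push_cast; ring
      rw [h1, h2]
      have hne : ((j:Int) + 1) ≠ -1 := by omega
      simp only [hne, if_false]
    · have h1 : PySem.Chars.rfind.go (c :: s) [ch] (j + 1 + 1) = PySem.Chars.rfind.go (c :: s) [ch] (j + 1) := by
        simp only [PySem.Chars.rfind.go, hdrop, hp, Bool.false_eq_true, if_false]
      have h2 : PySem.Chars.rfind.go s [ch] (j + 1) = PySem.Chars.rfind.go s [ch] j := by
        simp only [PySem.Chars.rfind.go, hp, Bool.false_eq_true, if_false]
      rw [h1, h2, ih]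

lemma rfind_nil (ch : Char) : PySem.Chars.rfind [] [ch] = -1 := by
  simp [PySem.Chars.rfind, PySem.Chars.rfind.go]

lemma rfind_cons (c ch : Char) (s : List Char) :
    PySem.Chars.rfind (c :: s) [ch] =
      if PySem.Chars.rfind s [ch] = -1 then (if ch = c then 0 else -1)
      else PySem.Chars.rfind s [ch] + 1 := by
  have hl : (c :: s).length = s.length + 1 := rfl
  simp only [PySem.Chars.rfind, hl]
  exact rfind_go_cons c ch s s.length

-- A's loop, when it never breaks, computes the count / rfind closed forms
lemma loopNB (pos : Int) : ∀ (cs : List Char) (i line col start : Int),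
    (pos < i ∨ i + (cs.length : Int) ≤ pos) →
    edLoop pos cs i line col start =
      (line + (PySem.Chars.count cs ['\n'] : Int),
       if PySem.Chars.rfind cs ['\n'] = -1 then col + (cs.length : Int)
         else (cs.length : Int) - PySem.Chars.rfind cs ['\n'],
       if PySem.Chars.rfind cs ['\n'] = -1 then start
         else i + PySem.Chars.rfind cs ['\n'] + 1) := by
  intro cs
  induction cs with
  | nil =>
    intro i line col start _
    simp [edLoop, count_singleton, rfind_nil]
  | cons ch rest ih =>
    intro i line col start hnb
    have hne : ¬ (i = pos) := by
      rcases hnb with h | h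
      · omega
      · simp only [List.length_cons] at h; push_cast at h; omega
    have hnb' : pos < i + 1 ∨ (i + 1) + (rest.length : Int) ≤ pos := by
      rcases hnb with h | h
      · left; omega
      · right; simp only [List.length_cons] at h; push_cast at h; omega
    have hge := rfind_ge rest ['\n']
    by_cases hch : ch = '\n'
    · subst hch
      simp only [edLoop, hne, if_false, if_pos rfl]
      rw [ih (i+1) (line+1) 1 (i+1) hnb']
      rw [count_cons_nl, rfind_cons]
      by_cases hr : PySem.Chars.rfind rest ['\n'] = -1
      · rw [if_pos hr, if_pos rfl, if_pos hr, if_pos hr,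
            if_neg (by omega : ¬ ((0:Int) = -1)), if_neg (by omega : ¬ ((0:Int) = -1))]
        refine Prod.ext ?_ (Prod.ext ?_ ?_) <;> simp only [List.length_cons] <;> push_cast <;> omega
      · rw [if_neg hr, if_neg hr, if_neg hr,
            if_neg (by omega : ¬ (PySem.Chars.rfind rest ['\n'] + 1 = -1)),
            if_neg (by omega : ¬ (PySem.Chars.rfind rest ['\n'] + 1 = -1))]
        refine Prod.ext ?_ (Prod.ext ?_ ?_) <;> simp only [List.length_cons] <;> push_cast <;> omega
    · simp only [edLoop, hne, if_false, hch]
      rw [ih (i+1) line (col+1) start hnb']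
      rw [count_cons_other hch, rfind_cons]
      have hcc : ¬ ('\n' = ch) := fun h => hch h.symm
      by_cases hr : PySem.Chars.rfind rest ['\n'] = -1
      · rw [if_pos hr, if_neg hcc, if_pos hr, if_pos hr, if_pos rfl, if_pos rfl]
        refine Prod.ext ?_ (Prod.ext ?_ ?_) <;> simp only [List.length_cons] <;> push_cast <;> omega
      · rw [if_neg hr, if_neg hr, if_neg hr,
            if_neg (by omega : ¬ (PySem.Chars.rfind rest ['\n'] + 1 = -1)),
            if_neg (by omega : ¬ (PySem.Chars.rfind rest ['\n'] + 1 = -1))]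
        refine Prod.ext ?_ (Prod.ext ?_ ?_) <;> simp only [List.length_cons] <;> push_cast <;> omega

-- the break at i == pos truncates the scanned list
lemma loopTake (pos : Int) : ∀ (cs : List Char) (i line col start : Int), 0 ≤ pos - i →
    edLoop pos cs i line col start = edLoop pos (cs.take (pos - i).toNat) i line col start := by
  intro cs
  induction cs with
  | nil => intro i line col start _; simp
  | cons ch rest ih =>
    intro i line col start h0
    by_cases hip : i = pos
    · have ht : (pos - i).toNat = 0 := by omega
      simp [ht, edLoop, hip]
    · have h1 : (pos - i).toNat = (pos - (i+1)).toNat + 1 := by omega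
      rw [h1, List.take_succ_cons]
      by_cases hch : ch = '\n' <;>
        simp only [edLoop, hip, if_false, hch, if_true, Bool.false_eq_true] <;>
        exact ih (i+1) _ _ _ (by omega)

-- ===== VERDICT (by name: the statement is the Claim_ definition above) =====
theorem error_details_spec : Claim_equal_error_details := by
  intro text pos _
  unfold Spec_error_details
  simp only [error_details, error_details_alt, PySem.Str.len_eq]
  set cs := text.toList with hcs
  set n : Int := (cs.length : Int) with hn
  set p : Int := if 0 ≤ pos ∧ pos ≤ n then pos else n with hp
  have hp0 : 0 ≤ p ∧ p ≤ n := by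
    rw [hp]; split_ifs with h
    · exact ⟨h.1, h.2⟩
    · constructor
      · rw [hn]; positivity
      · exact le_rfl
  have hbefore : PySem.List.slice cs none (some p) = cs.take p.toNat :=
    PySem.List.slice_to cs hp0.1
  have hloop : edLoop pos cs 0 1 1 0 = edLoop pos (cs.take p.toNat) 0 1 1 0 := by
    by_cases hneg : 0 ≤ pos
    · rw [loopTake pos cs 0 1 1 0 (by omega)]
      congr 1
      by_cases hle : pos ≤ n
      · have hpe : p = pos := by rw [hp]; simp [hneg, hle]
        rw [hpe]
        norm_num
      · have hpe : p = n := by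
          rw [hp]
          have : ¬ (0 ≤ pos ∧ pos ≤ n) := fun h => hle h.2
          simp [this]
        have h1 : cs.length ≤ (pos - 0).toNat := by omega
        have h2 : cs.length ≤ p.toNat := by omega
        rw [List.take_of_length_le h1, List.take_of_length_le h2]
    · have hpe : p = n := by
        rw [hp]
        have : ¬ (0 ≤ pos ∧ pos ≤ n) := fun h => hneg h.1
        simp [this]
      rw [hpe]
      have : cs.length ≤ n.toNat := by omega
      rw [List.take_of_length_le this]
  have hlen2 : ((cs.take p.toNat).length : Int) = p := by
    rw [List.length_take]
    omega
  have hnb : pos < 0 ∨ 0 + ((cs.take p.toNat).length : Int) ≤ pos := by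
    rw [hlen2]
    by_cases hneg : 0 ≤ pos
    · right
      rw [hp]; split_ifs with h
      · omega
      · rcases not_and_or.mp h with h1 | h2
        · exact absurd hneg h1
        · omega
    · left; omega
  rw [hloop, loopNB pos (cs.take p.toNat) 0 1 1 0 hnb, hbefore]
  set before := cs.take p.toNat with hb
  set r : Int := PySem.Chars.rfind before ['\n'] with hr
  have hrge : -1 ≤ r := by rw [hr]; exact rfind_ge before ['\n']
  have hstart : (if r = -1 then (0:Int) else 0 + r + 1) = r + 1 := by
    split_ifs with h
    · omega
    · ring
  have hcol : (if r = -1 then (1:Int) + (before.length : Int) else (before.length : Int) - r)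
      = p - (r + 1) + 1 := by
    rw [hlen2]
    split_ifs with h
    · omega
    · omega
  refine Prod.ext rfl (Prod.ext ?_ (Prod.ext ?_ ?_))
  · simp only []
    push_cast
    ring
  · simp only [hcol]
  · simp only [hstart]
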